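-- pv_equiv track=rewrite | github.com/linhdvu14/cp-sols | sols/CodeForces/1853_d2/D_Imbalanced_Arrays.py | solve
-- ===== SOURCE A (Python) =====
-- from collections import deque
--
-- def solve(N, A):
--     idx = deque(sorted(list(range(N)), key=lambda i: A[i]))
--     res = [0] * N
--     sub = 0
--     while idx:
--         x = len(idx)
--         if A[idx[0]] == sub:
--             i = idx.popleft()
--             res[i] = -x
--         elif A[idx[-1]] == x + sub:
--             i = idx.pop()
--             res[i] = x
--             sub += 1
--         else:
--             return 'NO', []
--
--     return 'YES', res
-- ===== SOURCE B (Python) =====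
-- from collections import deque
--
-- def solve(N, A):
--     # Direct-lookup greedy, no sorting: bucket indices by value (values of a
--     # solvable instance lie in [0, N]); for magnitude m = N..1 with p positives
--     # assigned so far, the unique admissible next element has value exactly p
--     # (gets -m) or exactly m + p (gets +m), so look those two buckets up directly.
--     buckets = [deque() for _ in range(N + 1)]
--     for i in range(N):
--         v = A[i]
--         if v < 0 or v > N:
--             return 'NO', []
--         buckets[v].append(i)
--     res = [0] * N
--     p = 0
--     for m in range(N, 0, -1):
--         if buckets[p]:
--             res[buckets[p].popleft()] = -m
--         elif buckets[m + p]: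
--             res[buckets[m + p].pop()] = m
--             p += 1
--         else:
--             return 'NO', []
--     return 'YES', res
-- ===== Notes on version B (the rewrite author's own statement) =====
-- stated objective: alternative
-- what changed: Replaces A's sort-by-value + two-ended deque greedy (compare the current min/max against sub and x+sub) with a sort-free direct-lookup greedy: bucket indices by value once, then for magnitude m = N..1 with p positives assigned look up the two uniquely admissible value buckets p (assign -m) and m+p (assign +m) directly; no ordering of the elements is ever materialized.
import Mathlib
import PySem

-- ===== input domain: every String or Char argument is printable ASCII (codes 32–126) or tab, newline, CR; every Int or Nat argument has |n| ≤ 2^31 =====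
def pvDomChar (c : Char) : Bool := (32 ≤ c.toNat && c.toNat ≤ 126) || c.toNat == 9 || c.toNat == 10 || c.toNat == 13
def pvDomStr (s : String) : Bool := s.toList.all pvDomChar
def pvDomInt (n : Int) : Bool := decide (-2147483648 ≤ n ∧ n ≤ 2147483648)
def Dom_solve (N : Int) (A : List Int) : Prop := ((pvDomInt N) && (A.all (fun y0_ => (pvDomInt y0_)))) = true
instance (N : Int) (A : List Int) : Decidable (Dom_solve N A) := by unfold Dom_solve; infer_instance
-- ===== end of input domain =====

-- B replaces A's sort + two-ended deque greedy with a sort-free direct-lookup greedy: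
-- indices are bucketed by value, and at magnitude m with p positives assigned the two
-- uniquely admissible value buckets p and m+p are looked up directly.

-- ===== PORT A =====
-- the while-loop of A: state (idx deque as a list, res, sub); popleft = tail, pop = dropLast
def loopA (A : List Int) (idx res : List Int) (sub : Int) : String × List Int :=
  match idx with
  | [] => ("YES", res)
  | h :: t =>
    let x : Int := ((h :: t).length : Int)
    if PySem.List.pyGetD A h 0 = sub then
      loopA A t (PySem.List.pySetD res h (-x)) sub
    else if PySem.List.pyGetD A (PySem.List.pyGetD (h :: t) (-1) 0) 0 = x + sub then
      loopA A (h :: t).dropLast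
        (PySem.List.pySetD res (PySem.List.pyGetD (h :: t) (-1) 0) x) (sub + 1)
    else ("NO", [])
termination_by idx.length
decreasing_by
  · simp
  · simp [List.length_dropLast]

def solve (N : Int) (A : List Int) : String × List Int :=
  loopA A (PySem.List.sorted (PySem.List.pyRange 0 N) (fun i => PySem.List.pyGetD A i 0))
    (List.replicate N.toNat 0) 0

-- ===== PORT B =====
-- B's bucket-filling for-loop with early 'NO' on a value outside [0, N]
-- (buckets[v].append(i) is exact as set/getD: 0 ≤ v ≤ N < buckets length)
def fillB (A : List Int) (N : Int) : List Int → List (List Int) → Option (List (List Int))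
  | [], bs => some bs
  | i :: is, bs =>
    let v := PySem.List.pyGetD A i 0
    if v < 0 ∨ N < v then none
    else fillB A N is (bs.set v.toNat ((bs.getD v.toNat []) ++ [i]))

-- B's main for-loop over m = N..1; popleft = head/tail, pop = getLast/dropLast
def loopB (bs : List (List Int)) (res : List Int) (m p : Nat) : String × List Int :=
  match m with
  | 0 => ("YES", res)
  | Nat.succ m' =>
    if hbp : bs.getD p [] ≠ [] then
      loopB (bs.set p (bs.getD p []).tail)
        (PySem.List.pySetD res ((bs.getD p []).head hbp) (-((m' + 1 : Nat) : Int))) m' p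
    else if hbq : bs.getD (m' + 1 + p) [] ≠ [] then
      loopB (bs.set (m' + 1 + p) (bs.getD (m' + 1 + p) []).dropLast)
        (PySem.List.pySetD res ((bs.getD (m' + 1 + p) []).getLast hbq) ((m' + 1 : Nat) : Int)) m' (p + 1)
    else ("NO", [])

def solve_alt (N : Int) (A : List Int) : String × List Int :=
  match fillB A N (PySem.List.pyRange 0 N) (List.replicate (N + 1).toNat []) with
  | none => ("NO", [])
  | some bs => loopB bs (List.replicate N.toNat 0) N.toNat 0

-- ===== PRECONDITION & SPEC =====
-- Pre excludes exactly the inputs where the Python A raises IndexError: N > len(A)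
def Pre_solve (N : Int) (A : List Int) : Prop := N ≤ (A.length : Int)
instance (N : Int) (A : List Int) : Decidable (Pre_solve N A) := by unfold Pre_solve; infer_instance
def pvWitness_solve : Int × List Int := (3, [1, 3, 2])

def Spec_solve (N : Int) (A : List Int) (out : String × List Int) : Prop := out = solve_alt N A
instance (N : Int) (A : List Int) (out : String × List Int) : Decidable (Spec_solve N A out) := by unfold Spec_solve; infer_instance

-- ===== CLAIM (what is proved, stated in full; the proofs are below) =====
def Claim_equal_solve : Prop := ∀ (N : Int) (A : List Int), Dom_solve N A → Pre_solve N A → Spec_solve N A (solve N A)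

-- ===== LEMMAS AND PROOFS =====

-- insertBy skips a prefix of elements it is not 'before'
theorem insertBy_append_left {α : Type} (lt : α → α → Bool) (x : α) (b l : List α)
    (hb : ∀ y ∈ b, lt x y = false) :
    PySem.List.insertBy lt x (b ++ l) = b ++ PySem.List.insertBy lt x l := by
  induction b with
  | nil => simp
  | cons y w ih =>
    simp only [List.cons_append, PySem.List.insertBy, hb y (by simp)]
    simp only [Bool.false_eq_true, if_false, List.cons.injEq, true_and]
    exact ih (fun z hz => hb z (by simp [hz]))

-- insertBy goes to the front when it is 'before' everything
theorem insertBy_front {α : Type} (lt : α → α → Bool) (x : α) (l : List α)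
    (hl : ∀ z ∈ l, lt x z = true) :
    PySem.List.insertBy lt x l = x :: l := by
  cases l with
  | nil => rfl
  | cons z w => simp [PySem.List.insertBy, hl z (by simp)]

-- inserting x into the flatten of key-homogeneous buckets appends it to its bucket
theorem insertBy_flatten (key : Int → Int) (x : Int) :
    ∀ (bs : List (List Int)) (off : Int) (v : Nat), v < bs.length →
    (∀ j (hj : j < bs.length), ∀ y ∈ bs[j], key y = off + j) → key x = off + v →
    PySem.List.insertBy (fun a b => decide (key a < key b)) x bs.flatten
      = (bs.set v ((bs.getD v []) ++ [x])).flatten := by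
  intro bs
  induction bs with
  | nil => intro off v hv _ _; simp at hv
  | cons b rest ih =>
    intro off v hv hkeys hx
    match v with
    | 0 =>
      have hb : ∀ y ∈ b, (fun a c => decide (key a < key c)) x y = false := by
        intro y hy
        have := hkeys 0 (by simp) y (by simpa using hy)
        simp at this ⊢
        omega
      have hrest : ∀ z ∈ rest.flatten, (fun a c => decide (key a < key c)) x z = true := by
        intro z hz
        rcases List.mem_flatten.mp hz with ⟨l, hl, hzl⟩
        rcases List.mem_iff_getElem.mp hl with ⟨j, hj, rfl⟩
        have := hkeys (j + 1) (by simpa using Nat.succ_lt_succ hj) z (by simpa using hzl)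
        simp at this ⊢
        omega
      simp only [List.flatten_cons]
      rw [insertBy_append_left _ _ _ _ hb, insertBy_front _ _ _ hrest]
      simp
    | w + 1 =>
      have hb : ∀ y ∈ b, (fun a c => decide (key a < key c)) x y = false := by
        intro y hy
        have := hkeys 0 (by simp) y (by simpa using hy)
        simp at this ⊢
        omega
      simp only [List.flatten_cons]
      rw [insertBy_append_left _ _ _ _ hb]
      have := ih (off + 1) w (by simpa using Nat.lt_of_succ_lt_succ hv)
        (fun j hj y hy => by
          have := hkeys (j + 1) (by simpa using Nat.succ_lt_succ hj) y (by simpa using hy)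
          rw [this]; push_cast; ring)
        (by rw [hx]; push_cast; ring)
      rw [this]
      simp

-- fillB returns none as soon as some value is out of range
theorem fillB_none (A : List Int) (N : Int) :
    ∀ (is : List Int) (bs : List (List Int)),
    (∃ i ∈ is, PySem.List.pyGetD A i 0 < 0 ∨ N < PySem.List.pyGetD A i 0) →
    fillB A N is bs = none := by
  intro is
  induction is with
  | nil => intro bs h; simp at h
  | cons i rest ih =>
    intro bs h
    by_cases hbad : PySem.List.pyGetD A i 0 < 0 ∨ N < PySem.List.pyGetD A i 0
    · simp [fillB, hbad]
    · rcases h with ⟨j, hj, hbadj⟩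
      rcases List.mem_cons.mp hj with rfl | hj'
      · exact absurd hbadj hbad
      · simp only [fillB, if_neg hbad]
        exact ih _ ⟨j, hj', hbadj⟩

-- fillB succeeds on in-range values; its buckets flatten to the insertion sort and are key-homogeneous
theorem fillB_sorted (A : List Int) (N : Int) :
    ∀ (is : List Int) (bs : List (List Int)) (acc : List Int),
    (∀ i ∈ is, ¬(PySem.List.pyGetD A i 0 < 0 ∨ N < PySem.List.pyGetD A i 0)) →
    (∀ j (hj : j < bs.length), ∀ y ∈ bs[j], PySem.List.pyGetD A y 0 = (j : Int)) →
    N.toNat + 1 ≤ bs.length →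
    acc = bs.flatten →
    ∃ bs', fillB A N is bs = some bs' ∧
      is.foldl (fun acc x =>
        PySem.List.insertBy
          (fun a b => decide (PySem.List.pyGetD A a 0 < PySem.List.pyGetD A b 0)) x acc) acc
        = bs'.flatten ∧
      (∀ j (hj : j < bs'.length), ∀ y ∈ bs'[j], PySem.List.pyGetD A y 0 = (j : Int)) := by
  intro is
  induction is with
  | nil => intro bs acc _ hkeys _ hacc; exact ⟨bs, rfl, hacc, hkeys⟩
  | cons i rest ih =>
    intro bs acc hgood hkeys hlen hacc
    set key : Int → Int := fun y => PySem.List.pyGetD A y 0 with hkeydef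
    have hi := hgood i (by simp)
    have h0 : 0 ≤ key i := by simp [hkeydef] at hi ⊢; omega
    have hN : key i ≤ N := by simp [hkeydef] at hi ⊢; omega
    have hv : (key i).toNat < bs.length := by omega
    simp only [fillB, if_neg hi]
    have hstep := insertBy_flatten key i bs 0 (key i).toNat hv
      (fun j hj y hy => by simpa using hkeys j hj y hy)
      (by omega)
    have := ih (bs.set (key i).toNat ((bs.getD (key i).toNat []) ++ [i]))
      (PySem.List.insertBy (fun a b => decide (key a < key b)) i acc)
      (fun z hz => hgood z (List.mem_cons_of_mem _ hz))
      (fun j hj y hy => by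
        rw [List.length_set] at hj
        by_cases hje : j = (key i).toNat
        · subst hje
          rw [List.getElem_set_self] at hy
          rcases List.mem_append.mp hy with hy' | hy'
          · exact hkeys _ hv _ (by rwa [List.getD_eq_getElem _ _ hv] at hy')
          · simp at hy'; subst hy'; simp [hkeydef] at h0 ⊢; omega
        · rw [List.getElem_set_ne (by omega)] at hy
          exact hkeys j hj y hy)
      (by rw [List.length_set]; exact hlen)
      (by rw [hacc]; exact hstep)
    simpa using this

-- A's loop answers NO whenever some remaining index can never be popped
theorem loopA_no_aux (A : List Int) :
    ∀ (n : Nat) (idx res : List Int) (sub b : Int), idx.length ≤ n → b ∈ idx →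
    (PySem.List.pyGetD A b 0 < sub ∨ (idx.length : Int) + sub < PySem.List.pyGetD A b 0) →
    loopA A idx res sub = ("NO", []) := by
  intro n
  induction n with
  | zero =>
    intro idx res sub b hlen hb _
    have : idx = [] := List.eq_nil_of_length_eq_zero (Nat.le_zero.mp hlen)
    subst this; simp at hb
  | succ n ih =>
    intro idx res sub b hlen hb hcond
    match idx with
    | [] => simp at hb
    | h :: t =>
      have hx1 : (1 : Int) ≤ ((h :: t).length : Int) := by simp
      rw [loopA]
      by_cases h1 : PySem.List.pyGetD A h 0 = sub
      · rw [if_pos h1]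
        have hbh : b ≠ h := by
          rintro rfl
          rcases hcond with hc | hc <;> omega
        have hbt : b ∈ t := by rcases List.mem_cons.mp hb with rfl | h' <;> [exact absurd rfl hbh; exact h']
        apply ih t _ sub b (by simp at hlen; omega) hbt
        rcases hcond with hc | hc
        · exact Or.inl hc
        · right; simp only [List.length_cons] at hc; push_cast at hc ⊢; omega
      · rw [if_neg h1]
        have hne : (h :: t) ≠ [] := by simp
        rw [PySem.List.pyGetD_neg_one _ _ hne]
        set last := (h :: t).getLast hne with hlast
        by_cases h2 : PySem.List.pyGetD A last 0 = ((h :: t).length : Int) + sub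
        · rw [if_pos h2]
          have hbl : b ≠ last := by
            rintro rfl
            rcases hcond with hc | hc <;> omega
          have hbd : b ∈ (h :: t).dropLast := by
            have := List.dropLast_append_getLast hne
            rw [← this] at hb
            rcases List.mem_append.mp hb with h' | h'
            · exact h'
            · simp [← hlast] at h'; exact absurd h' hbl
          have hdl : (h :: t).dropLast.length = t.length := by simp
          apply ih _ _ (sub + 1) b (by rw [hdl]; simp at hlen; omega) hbd
          rcases hcond with hc | hc
          · left; omega
          · right; rw [hdl]; simp only [List.length_cons] at hc; push_cast at hc ⊢; omega
        · rw [if_neg h2]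

theorem loopA_no (A : List Int) (idx res : List Int) (sub b : Int) (hb : b ∈ idx)
    (hcond : PySem.List.pyGetD A b 0 < sub ∨ (idx.length : Int) + sub < PySem.List.pyGetD A b 0) :
    loopA A idx res sub = ("NO", []) :=
  loopA_no_aux A idx.length idx res sub b le_rfl hb hcond

-- key-homogeneity is preserved by replacing one bucket with a same-key list
theorem keys_set (A : List Int) (bs : List (List Int)) (v : Nat) (l : List Int)
    (hv : v < bs.length)
    (hkeys : ∀ j (hj : j < bs.length), ∀ y ∈ bs[j], PySem.List.pyGetD A y 0 = (j : Int))
    (hl : ∀ y ∈ l, y ∈ bs[v]) :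
    ∀ j (hj : j < (bs.set v l).length), ∀ y ∈ (bs.set v l)[j], PySem.List.pyGetD A y 0 = (j : Int) := by
  intro j hj y hy
  by_cases hje : j = v
  · subst hje
    rw [List.getElem_set_self] at hy
    exact hkeys j (by simpa using hj) y (hl y hy)
  · rw [List.getElem_set_ne (by omega)] at hy
    exact hkeys j (by simpa using hj) y hy

theorem flatten_replicate_nil {α : Type} (n : Nat) : (List.replicate n ([] : List α)).flatten = [] := by
  induction n with
  | zero => rfl
  | succ n ih => rw [List.replicate_succ, List.flatten_cons, List.nil_append, ih]

-- getLast/head are proof-irrelevant along an equality of lists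
theorem getLast_congr {α : Type} (l l' : List α) (h : l ≠ []) (h' : l' ≠ []) (e : l = l') :
    l.getLast h = l'.getLast h' := by subst e; rfl

theorem head_congr {α : Type} (l l' : List α) (h : l ≠ []) (h' : l' ≠ []) (e : l = l') :
    l.head h = l'.head h' := by subst e; rfl

-- decomposition of a nonempty flatten at its head: the first nonempty bucket
theorem flatten_head_decomp {α : Type} :
    ∀ (bs : List (List α)) (h : α) (t : List α), bs.flatten = h :: t →
    ∃ j, ∃ hj : j < bs.length, ∃ u, bs[j] = h :: u ∧
      (∀ k (hk : k < bs.length), k < j → bs[k] = []) ∧ (bs.set j u).flatten = t := by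
  intro bs
  induction bs with
  | nil => intro h t he; simp at he
  | cons b rest ih =>
    intro h t he
    match b, he with
    | [], he =>
      simp only [List.flatten_cons, List.nil_append] at he
      obtain ⟨j, hj, u, hbj, hemp, hset⟩ := ih h t he
      refine ⟨j + 1, by simpa using Nat.succ_lt_succ hj, u, by simpa using hbj, ?_, ?_⟩
      · intro k hk hkj
        match k with
        | 0 => rfl
        | k + 1 => exact hemp k (by simpa using Nat.lt_of_succ_lt_succ hk) (by omega)
      · simpa using hset
    | b0 :: bu, he =>
      simp only [List.flatten_cons, List.cons_append, List.cons.injEq] at he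
      refine ⟨0, by simp, bu ++ ?hack, ?_, ?_, ?_⟩
      case hack => exact []
      · simp [he.1]
      · intro k hk hkj; omega
      · simp [← he.2]

-- decomposition of a nonempty flatten at its last element: the last nonempty bucket
theorem flatten_last_decomp {α : Type} :
    ∀ (bs : List (List α)) (hne : bs.flatten ≠ []),
    ∃ j, ∃ hj : j < bs.length, ∃ u, bs[j] = u ++ [bs.flatten.getLast hne] ∧
      (∀ k (hk : k < bs.length), j < k → bs[k] = []) ∧ (bs.set j u).flatten = bs.flatten.dropLast := by
  intro bs
  induction bs with
  | nil => intro hne; simp at hne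
  | cons b rest ih =>
    intro hne
    by_cases hr : rest.flatten = []
    · have hb : b ≠ [] := by
        intro hb0
        apply hne
        simp [List.flatten_cons, hb0, hr]
      have hfl : (b :: rest).flatten = b := by simp [List.flatten_cons, hr]
      have hlast : (b :: rest).flatten.getLast hne = b.getLast hb :=
        getLast_congr _ _ _ _ hfl
      refine ⟨0, by simp, b.dropLast, ?_, ?_, ?_⟩
      · rw [hlast]; exact (List.dropLast_append_getLast hb).symm
      · intro k hk h0k
        match k, hk with
        | k + 1, hk =>
          have hk' : k < rest.length := by simp at hk; omega
          simpa using (List.flatten_eq_nil_iff.mp hr) rest[k] (by simpa using List.getElem_mem hk')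
      · simp [hr]
    · have hrne : rest.flatten ≠ [] := hr
      obtain ⟨j, hj, u, hbj, hemp, hset⟩ := ih hrne
      have hlast : (b :: rest).flatten.getLast hne = rest.flatten.getLast hrne := by
        simp only [List.flatten_cons]
        exact List.getLast_append_of_ne_nil (by simpa using hne) hrne
      refine ⟨j + 1, by simpa using Nat.succ_lt_succ hj, u, ?_, ?_, ?_⟩
      · rw [hlast]
        simpa using hbj
      · intro k hk hjk
        match k with
        | k + 1 => exact hemp k (by simpa using Nat.lt_of_succ_lt_succ hk) (by omega)
      · simp only [List.set_cons_succ, List.flatten_cons, hset]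
        rw [List.dropLast_append_of_ne_nil hrne]

-- length bookkeeping for a bucket update
theorem flatten_length_set {α : Type} (bs : List (List α)) (v : Nat) (l : List α) (hv : v < bs.length) :
    ((bs.set v l).flatten).length + bs[v].length = bs.flatten.length + l.length := by
  induction bs generalizing v with
  | nil => simp at hv
  | cons b rest ih =>
    match v with
    | 0 => simp [List.flatten_cons]; omega
    | w + 1 =>
      have := ih w (by simpa using Nat.lt_of_succ_lt_succ hv)
      simp only [List.set_cons_succ, List.flatten_cons, List.length_append, List.getElem_cons_succ]
      omega

-- B's loop answers NO whenever some nonempty bucket can never be reached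
theorem loopB_no :
    ∀ (m : Nat) (bs : List (List Int)) (res : List Int) (p : Nat),
    bs.flatten.length = m →
    (∃ j, ∃ hj : j < bs.length, bs[j] ≠ [] ∧ (j < p ∨ m + p < j)) →
    loopB bs res m p = ("NO", []) := by
  intro m
  induction m with
  | zero =>
    intro bs res p hm hstuck
    obtain ⟨j, hj, hne, _⟩ := hstuck
    exact absurd (List.flatten_eq_nil_iff.mp (List.eq_nil_of_length_eq_zero hm) _
      (List.getElem_mem hj)) hne
  | succ m ih =>
    intro bs res p hm hstuck
    obtain ⟨j, hj, hne, hout⟩ := hstuck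
    rw [loopB]
    by_cases hbp : bs.getD p [] ≠ []
    · rw [dif_pos hbp]
      have hp : p < bs.length := by
        by_contra hp
        exact hbp (List.getD_eq_default _ _ (by omega))
      have hgd : bs.getD p [] = bs[p] := List.getD_eq_getElem _ _ hp
      have hjp : j ≠ p := by omega
      apply ih
      · have hfls := flatten_length_set bs p (bs.getD p []).tail hp
        have hbpl : 0 < bs[p].length := List.length_pos_of_ne_nil (by rwa [hgd] at hbp)
        have htl : (bs.getD p []).tail.length + 1 = bs[p].length := by
          rw [hgd, List.length_tail]; omega
        omega
      · exact ⟨j, by simpa using hj,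
          by rw [List.getElem_set_ne (by omega)]; exact hne, by omega⟩
    · rw [dif_neg hbp]
      by_cases hbq : bs.getD (m + 1 + p) [] ≠ []
      · rw [dif_pos hbq]
        have hq : m + 1 + p < bs.length := by
          by_contra hq
          exact hbq (List.getD_eq_default _ _ (by omega))
        have hgd : bs.getD (m + 1 + p) [] = bs[m + 1 + p] := List.getD_eq_getElem _ _ hq
        have hjq : j ≠ m + 1 + p := by omega
        apply ih
        · have hfls := flatten_length_set bs (m + 1 + p) (bs.getD (m + 1 + p) []).dropLast hq
          have hbql : 0 < bs[m + 1 + p].length := List.length_pos_of_ne_nil (by rwa [hgd] at hbq)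
          have htl : (bs.getD (m + 1 + p) []).dropLast.length + 1 = bs[m + 1 + p].length := by
            rw [hgd, List.length_dropLast]; omega
          omega
        · exact ⟨j, by simpa using hj,
            by rw [List.getElem_set_ne (by omega)]; exact hne, by omega⟩
      · rw [dif_neg hbq]

-- the heart: A's deque loop over the sorted order equals B's direct-lookup loop over the buckets
theorem loopA_eq_loopB (A : List Int) :
    ∀ (m : Nat) (bs : List (List Int)) (res : List Int) (p : Nat),
    bs.flatten.length = m →
    (∀ j (hj : j < bs.length), ∀ y ∈ bs[j], PySem.List.pyGetD A y 0 = (j : Int)) →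
    loopA A bs.flatten res (p : Int) = loopB bs res m p := by
  intro m
  induction m with
  | zero =>
    intro bs res p hm hkeys
    rw [List.eq_nil_of_length_eq_zero hm, loopA, loopB]
  | succ m ih =>
    intro bs res p hm hkeys
    obtain ⟨h, t, hflat⟩ : ∃ h t, bs.flatten = h :: t := by
      cases hfl : bs.flatten with
      | nil => rw [hfl] at hm; simp at hm
      | cons h t => exact ⟨h, t, rfl⟩
    obtain ⟨j0, hj0, u0, hb0, hemp0, hset0⟩ := flatten_head_decomp bs h t hflat
    have hkeyh : PySem.List.pyGetD A h 0 = (j0 : Int) := hkeys j0 hj0 h (by rw [hb0]; simp)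
    have hne : bs.flatten ≠ [] := by rw [hflat]; simp
    obtain ⟨j1, hj1, u1, hb1, hemp1, hset1⟩ := flatten_last_decomp bs hne
    have hkeyl : PySem.List.pyGetD A (bs.flatten.getLast hne) 0 = (j1 : Int) :=
      hkeys j1 hj1 _ (by rw [hb1]; simp)
    have hlen : t.length = m := by rw [hflat] at hm; simpa using hm
    have hne' : (h :: t) ≠ [] := List.cons_ne_nil _ _
    have hlasteq : (h :: t).getLast hne' = bs.flatten.getLast hne :=
      getLast_congr _ _ _ _ hflat.symm
    by_cases hbp : bs.getD p [] ≠ []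
    · have hp : p < bs.length := by
        by_contra hp'
        exact hbp (List.getD_eq_default _ _ (by omega))
      have hgd : bs.getD p [] = bs[p] := List.getD_eq_getElem _ _ hp
      by_cases hj0p : j0 = p
      · -- matching pop at the front: A's minimum has value exactly p
        subst hj0p
        have hbph : bs.getD j0 [] = h :: u0 := by rw [hgd, hb0]
        have hhead : (bs.getD j0 []).head hbp = h := by
          rw [head_congr _ (h :: u0) hbp (List.cons_ne_nil _ _) hbph]
          rfl
        have htail : (bs.getD j0 []).tail = u0 := by rw [hbph]; rfl
        rw [loopB, dif_pos hbp, hflat, loopA, if_pos hkeyh, hhead, htail]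
        have hx : ((h :: t).length : Int) = ((m + 1 : Nat) : Int) := by
          simp [hlen]
        rw [hx]
        rw [← hset0]
        apply ih
        · rw [hset0]; exact hlen
        · exact keys_set A bs j0 u0 hj0 hkeys (by intro y hy; rw [hb0]; exact List.mem_cons_of_mem _ hy)
      · -- bucket p is nonempty but the minimum is below p: both answer NO
        have hpj : j0 < p := by
          rcases Nat.lt_or_ge j0 p with hlt | hge
          · exact hlt
          · exfalso
            exact hbp (by rw [hgd, hemp0 p hp (by omega)])
        rw [loopA_no A bs.flatten res (p : Int) h (by rw [hflat]; simp)
          (Or.inl (by rw [hkeyh]; exact_mod_cast hpj))]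
        rw [loopB_no (m + 1) bs res p hm ⟨j0, hj0, by rw [hb0]; simp, Or.inl hpj⟩]
    · push_neg at hbp
      have hj0p : j0 ≠ p := by
        intro hje
        subst hje
        rw [List.getD_eq_getElem _ _ hj0, hb0] at hbp
        simp at hbp
      have hcond1 : ¬ (PySem.List.pyGetD A h 0 = (p : Int)) := by
        rw [hkeyh]
        exact_mod_cast hj0p
      by_cases hbq : bs.getD (m + 1 + p) [] ≠ []
      · have hq : m + 1 + p < bs.length := by
          by_contra hq'
          exact hbq (List.getD_eq_default _ _ (by omega))
        have hgq : bs.getD (m + 1 + p) [] = bs[m + 1 + p] := List.getD_eq_getElem _ _ hq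
        by_cases hj1q : j1 = m + 1 + p
        · -- matching pop at the back: A's maximum has value exactly m+1+p
          subst hj1q
          have hbqv : bs.getD (m + 1 + p) [] = u1 ++ [bs.flatten.getLast hne] := by
            rw [hgq, hb1]
          have hblast : (bs.getD (m + 1 + p) []).getLast hbq = bs.flatten.getLast hne := by
            rw [getLast_congr _ (u1 ++ [bs.flatten.getLast hne]) hbq (by simp) hbqv]
            exact List.getLast_concat
          have hdrop : (bs.getD (m + 1 + p) []).dropLast = u1 := by
            rw [hbqv, List.dropLast_concat]
          rw [loopB, dif_neg (not_not_intro hbp), dif_pos hbq, hflat, loopA, if_neg hcond1]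
          rw [PySem.List.pyGetD_neg_one _ _ hne', hlasteq]
          have hcond2 : PySem.List.pyGetD A (bs.flatten.getLast hne) 0
              = ((h :: t).length : Int) + (p : Int) := by
            rw [hkeyl]
            have hlc : (h :: t).length = m + 1 := by simp [hlen]
            rw [hlc]
            push_cast
            ring
          rw [if_pos hcond2, hblast, hdrop]
          have hdl : (h :: t).dropLast = (bs.set (m + 1 + p) u1).flatten := by
            rw [hset1, hflat]
          have hx : ((h :: t).length : Int) = ((m + 1 : Nat) : Int) := by simp [hlen]
          have hsub : (p : Int) + 1 = ((p + 1 : Nat) : Int) := by push_cast; ring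
          rw [hx, hdl, hsub]
          apply ih
          · have := flatten_length_set bs (m + 1 + p) u1 hq
            rw [hset1] at this
            have hdll : bs.flatten.dropLast.length = m := by
              rw [hflat]
              simp [hlen]
            rw [hset1, hdll]
          · exact keys_set A bs (m + 1 + p) u1 hq hkeys
              (by intro y hy; rw [hb1]; exact List.mem_append_left _ hy)
        · -- bucket m+1+p is nonempty but the maximum is above it: both answer NO
          have hqj : m + 1 + p < j1 := by
            rcases Nat.lt_or_ge (m + 1 + p) j1 with hlt | hge
            · exact hlt
            · exfalso
              exact hbq (by rw [hgq, hemp1 _ hq (by omega)])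
          rw [loopA_no A bs.flatten res (p : Int) (bs.flatten.getLast hne)
            (List.getLast_mem hne)
            (Or.inr (by rw [hkeyl, hm]; push_cast; omega))]
          rw [loopB_no (m + 1) bs res p hm ⟨j1, hj1, by rw [hb1]; simp, Or.inr hqj⟩]
      · -- neither bucket p nor bucket m+1+p has an element: both answer NO
        push_neg at hbq
        have hj1q : j1 ≠ m + 1 + p := by
          intro hje
          have hblne : bs[j1] ≠ [] := by rw [hb1]; simp
          subst hje
          rw [List.getD_eq_getElem _ _ hj1] at hbq
          exact hblne hbq
        rw [loopB, dif_neg (not_not_intro hbp), dif_neg (not_not_intro hbq), hflat, loopA, if_neg hcond1]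
        rw [PySem.List.pyGetD_neg_one _ _ hne', hlasteq]
        have hcond2 : ¬ (PySem.List.pyGetD A (bs.flatten.getLast hne) 0
            = ((h :: t).length : Int) + (p : Int)) := by
          rw [hkeyl]
          intro hE
          apply hj1q
          have hlc : ((h :: t).length : Int) = ((m + 1 : Nat) : Int) := by simp [hlen]
          rw [hlc] at hE
          have hc : (((m + 1 + p : Nat)) : Int) = ((m + 1 : Nat) : Int) + (p : Int) := by
            push_cast; ring
          rw [← hc] at hE
          exact_mod_cast hE
        rw [if_neg hcond2]

-- ===== VERDICT (by name: the statement is the Claim_ definition above) =====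
theorem solve_spec : Claim_equal_solve := by
  intro N A _ _
  unfold Spec_solve solve solve_alt
  by_cases hbad : ∃ i ∈ PySem.List.pyRange 0 N, PySem.List.pyGetD A i 0 < 0 ∨ N < PySem.List.pyGetD A i 0
  · rw [fillB_none A N _ _ hbad]
    change _ = (("NO", []) : String × List Int)
    obtain ⟨i, hi, hbadi⟩ := hbad
    have hN : 0 < N := by
      by_contra hN
      rw [PySem.List.pyRange_one_eq_nil (by omega)] at hi
      simp at hi
    apply loopA_no A _ _ 0 i
    · rw [PySem.List.mem_sorted]; exact hi
    · have hlen : ((PySem.List.sorted (PySem.List.pyRange 0 N) (fun i => PySem.List.pyGetD A i 0)).length : Int) = N := by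
        rw [PySem.List.length_sorted, PySem.List.length_pyRange_one]; omega
      rw [hlen]
      omega
  · have hgood : ∀ i ∈ PySem.List.pyRange 0 N, ¬(PySem.List.pyGetD A i 0 < 0 ∨ N < PySem.List.pyGetD A i 0) :=
      fun i hi hP => hbad ⟨i, hi, hP⟩
    by_cases hN : 0 < N
    · obtain ⟨bs', hfill, hflat, hkeys⟩ := fillB_sorted A N (PySem.List.pyRange 0 N) (List.replicate (N + 1).toNat []) []
        hgood
        (fun j hj y hy => by simp [List.getElem_replicate] at hy)
        (by simp; omega)
        (by rw [flatten_replicate_nil])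
      rw [hfill]
      change _ = loopB bs' (List.replicate N.toNat 0) N.toNat 0
      have hsorted : PySem.List.sorted (PySem.List.pyRange 0 N) (fun i => PySem.List.pyGetD A i 0) = bs'.flatten := by
        rw [PySem.List.sorted_eq_foldl_insertBy]
        exact hflat
      have hlen : bs'.flatten.length = N.toNat := by
        rw [← hsorted, PySem.List.length_sorted, PySem.List.length_pyRange_one]; omega
      rw [hsorted]
      exact_mod_cast loopA_eq_loopB A N.toNat bs' (List.replicate N.toNat 0) 0 hlen hkeys
    · -- N ≤ 0: both loops run zero iterations and answer YES with the empty result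
      have hrange : PySem.List.pyRange 0 N = [] := PySem.List.pyRange_one_eq_nil (by omega)
      rw [hrange]
      have hs : PySem.List.sorted ([] : List Int) (fun i => PySem.List.pyGetD A i 0) = [] :=
        (PySem.List.sorted_eq_nil_iff _ _ _).mpr rfl
      rw [hs]
      have hm : N.toNat = 0 := by omega
      have hfill : fillB A N [] (List.replicate (N + 1).toNat []) = some (List.replicate (N + 1).toNat []) := rfl
      rw [hfill, hm]
      rw [loopA]
      rfl
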